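-- pv_equiv track=rewrite | github.com/bobleesj/sasmodels | explore/beta/sasfit_compare.py | popn
-- ===== SOURCE A (Python) =====
-- def popn(d, keys):
--     """
--     Splits a dict into two, with any key of *d* which is in *keys* removed
--     from *d* and added to *b*. Returns *b*.
--     """
--     b = {}
--     for k in keys:
--         try:
--             b[k] = d.pop(k)
--         except KeyError:
--             pass
--     return b
-- ===== SOURCE B (Python) =====
-- def popn(d, keys):
--     """
--     Splits a dict into two, with any key of *d* which is in *keys* removed
--     from *d* and added to *b*. Returns *b*.
--     """
--     b = {k: d[k] for k in keys if k in d}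
--     for k in list(b):
--         del d[k]
--     return b
-- ===== Notes on version B (the rewrite author's own statement) =====
-- stated objective: idiomatic
-- what changed: A's single read-and-mutate loop with try/except exception control flow is replaced by a two-pass collect-then-delete structure: a membership-guarded dict comprehension builds b from the untouched d, then a separate pass over b's keys deletes them from d.
import Mathlib
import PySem

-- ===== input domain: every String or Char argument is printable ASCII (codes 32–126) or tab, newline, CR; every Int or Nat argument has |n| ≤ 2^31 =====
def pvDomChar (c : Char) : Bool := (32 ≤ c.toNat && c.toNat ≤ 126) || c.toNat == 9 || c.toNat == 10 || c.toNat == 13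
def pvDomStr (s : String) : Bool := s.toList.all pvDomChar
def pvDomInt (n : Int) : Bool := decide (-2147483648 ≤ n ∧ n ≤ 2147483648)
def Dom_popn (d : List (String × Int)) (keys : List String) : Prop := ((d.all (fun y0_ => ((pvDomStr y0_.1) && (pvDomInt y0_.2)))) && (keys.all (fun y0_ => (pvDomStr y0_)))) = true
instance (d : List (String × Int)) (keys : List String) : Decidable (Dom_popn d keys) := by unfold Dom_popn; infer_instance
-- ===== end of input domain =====

-- B replaces A's read-and-mutate loop with try/except by a collect-then-delete two-pass
-- structure (membership-guarded comprehension, then a delete pass); equivalence proved for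
-- the RETURN value — both versions also mutate the caller's d identically (same keys removed).

-- ===== PORT A =====
-- one loop over keys: try b[k] = d.pop(k) / except KeyError: pass
def popnStepA (st : PySem.Dict String Int × PySem.Dict String Int) (k : String) :
    PySem.Dict String Int × PySem.Dict String Int :=
  match st.2.pop? k with
  | some (v, d') => (st.1.insert k v, d')   -- b[k] = d.pop(k)
  | none => st                              -- KeyError: pass

def popn (d : List (String × Int)) (keys : List String) : List (String × Int) :=
  (keys.foldl popnStepA (PySem.Dict.empty, PySem.Dict.mk d)).1.items

-- ===== PORT B =====
-- pass 1: b = {k: d[k] for k in keys if k in d}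
def popnStepB (dd : PySem.Dict String Int) (b : PySem.Dict String Int) (k : String) :
    PySem.Dict String Int :=
  if dd.contains k then b.insert k (dd.getD k 0) else b

def popn_alt (d : List (String × Int)) (keys : List String) : List (String × Int) :=
  let dd := PySem.Dict.mk d
  let b := keys.foldl (popnStepB dd) PySem.Dict.empty
  -- pass 2: for k in list(b): del d[k] — mutates only the caller's d, not the returned b
  let _ := b.keys.foldl (fun d2 k => d2.erase k) dd
  b.items

-- ===== PRECONDITION & SPEC =====
def Spec_popn (d : List (String × Int)) (keys : List String) (out : List (String × Int)) : Prop := out = popn_alt d keys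
instance (d : List (String × Int)) (keys : List String) (out : List (String × Int)) : Decidable (Spec_popn d keys out) := by unfold Spec_popn; infer_instance

-- ===== CLAIM (what is proved, stated in full; the proofs are below) =====
def Claim_equal_popn : Prop := ∀ (d : List (String × Int)) (keys : List String), Dom_popn d keys → Spec_popn d keys (popn d keys)

-- ===== LEMMAS AND PROOFS =====

theorem pv_get?_erase (dd : PySem.Dict String Int) (k k' : String) :
    (dd.erase k).get? k' = if k' = k then none else dd.get? k' := by
  obtain ⟨items⟩ := dd
  simp only [PySem.Dict.erase, PySem.Dict.get?]
  induction items with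
  | nil => simp
  | cons p rest ih =>
    by_cases hp : p.1 = k
    · have h1 : (!(p.1 == k)) = false := by simp [hp]
      rw [List.filter_cons, h1]
      simp only [Bool.false_eq_true, if_false]
      by_cases hq : k' = k
      · rw [ih, if_pos hq, if_pos hq]
      · rw [ih, if_neg hq, if_neg hq,
          List.find?_cons_of_neg (by simp [hp, Ne.symm hq])]
    · have h1 : (!(p.1 == k)) = true := by simp [hp]
      rw [List.filter_cons, if_pos h1]
      by_cases hq : p.1 = k'
      · have hq2 : ¬ k' = k := fun e => hp (hq.trans e)
        rw [if_neg hq2, List.find?_cons_of_pos (by simp [hq]),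
          List.find?_cons_of_pos (by simp [hq])]
      · rw [List.find?_cons_of_neg (by simp [hq]), ih]
        by_cases hk : k' = k
        · rw [if_pos hk, if_pos hk]
        · rw [if_neg hk, if_neg hk, List.find?_cons_of_neg (by simp [hq])]

-- re-inserting the binding a nodup-keyed dict already has is the identity
theorem pv_insert_of_get?_self (b : PySem.Dict String Int) (k : String) (v : Int)
    (hn : b.keys.Nodup) (h : b.get? k = some v) : b.insert k v = b := by
  have hmem : (k, v) ∈ b.items := PySem.Dict.mem_items_of_get?_eq_some b h
  have hc : b.contains k = true := by
    rw [PySem.Dict.contains_eq_isSome_get?, h]; rfl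
  apply PySem.Dict.ext
  rw [PySem.Dict.items_insert_of_contains b v hc]
  have hinj := List.inj_on_of_nodup_map (f := fun p : String × Int => p.1) hn
  conv_rhs => rw [← List.map_id b.items]
  apply List.map_congr_left
  intro p hp
  by_cases hpk : p.1 = k
  · have : p = (k, v) := hinj hp hmem (by simpa using hpk)
    simp [this]
  · simp [hpk]

-- loop invariant: A's (b, remaining-d) state versus B's b, over the fixed original dict D
theorem pv_loop_eq (D : PySem.Dict String Int) (keys : List String) :
    ∀ (b dd : PySem.Dict String Int),
      b.keys.Nodup →
      (∀ k, dd.get? k = if b.contains k then none else D.get? k) →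
      (∀ k v, b.get? k = some v → D.get? k = some v) →
      (keys.foldl popnStepA (b, dd)).1 = keys.foldl (popnStepB D) b := by
  induction keys with
  | nil => intro b dd _ _ _; rfl
  | cons k ks ih =>
    intro b dd hn inv2 inv3
    simp only [List.foldl_cons]
    cases hg : dd.get? k with
    | some v =>
      have hbk : b.contains k = false ∧ D.get? k = some v := by
        have := inv2 k
        rw [hg] at this
        by_cases hc : b.contains k = true
        · rw [if_pos hc] at this; exact absurd this.symm (by simp)
        · rw [if_neg hc] at this
          exact ⟨by simpa using hc, this.symm⟩
      have hDc : D.contains k = true := by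
        rw [PySem.Dict.contains_eq_isSome_get?, hbk.2]; rfl
      have hDg : D.getD k 0 = v := by
        rw [PySem.Dict.getD_eq_get?_getD, hbk.2]; rfl
      have hA : popnStepA (b, dd) k = (b.insert k v, dd.erase k) := by
        simp [popnStepA, PySem.Dict.pop?, hg]
      have hB : popnStepB D b k = b.insert k v := by
        simp [popnStepB, hDc, hDg]
      rw [hA, hB]
      apply ih
      · exact PySem.Dict.nodup_keys_insert _ _ _ hn
      · intro k'
        rw [pv_get?_erase, PySem.Dict.contains_insert]
        by_cases hk : k' = k
        · simp [hk]
        · have : (k' == k) = false := by simp [hk]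
          simp only [hk, this, Bool.false_or]
          exact inv2 k'
      · intro k' v' hv'
        rw [PySem.Dict.get?_insert] at hv'
        by_cases hk : k' = k
        · rw [if_pos hk] at hv'; rw [hk, hbk.2, ← hv']
        · rw [if_neg hk] at hv'; exact inv3 k' v' hv'
    | none =>
      have hA : popnStepA (b, dd) k = (b, dd) := by
        simp [popnStepA, PySem.Dict.pop?, hg]
      have hB : popnStepB D b k = b := by
        cases hc : b.contains k with
        | true =>
          have hsome : (b.get? k).isSome := by
            rw [← PySem.Dict.contains_eq_isSome_get?, hc]
          obtain ⟨v, hv⟩ := Option.isSome_iff_exists.mp hsome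
          have hD := inv3 k v hv
          have hDc : D.contains k = true := by
            rw [PySem.Dict.contains_eq_isSome_get?, hD]; rfl
          have hDg : D.getD k 0 = v := by
            rw [PySem.Dict.getD_eq_get?_getD, hD]; rfl
          simp [popnStepB, hDc, hDg, pv_insert_of_get?_self b k v hn hv]
        | false =>
          have hDn : D.get? k = none := by
            have := inv2 k
            rw [hg, if_neg (by simp [hc])] at this
            exact this.symm
          have hDc : D.contains k = false := by
            rw [PySem.Dict.contains_eq_isSome_get?, hDn]; rfl
          simp [popnStepB, hDc]
      rw [hA, hB]
      exact ih b dd hn inv2 inv3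

-- ===== VERDICT (by name: the statement is the Claim_ definition above) =====
theorem popn_spec : Claim_equal_popn := by
  intro d keys _
  show popn d keys = popn_alt d keys
  unfold popn popn_alt
  simp only []
  congr 1
  apply pv_loop_eq (PySem.Dict.mk d) keys PySem.Dict.empty (PySem.Dict.mk d)
  · exact PySem.Dict.nodup_keys_empty
  · intro k; rw [PySem.Dict.contains_empty]; simp
  · intro k v hv; rw [PySem.Dict.get?_empty] at hv; exact absurd hv (by simp)
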